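-- pv_equiv track=rewrite | github.com/OsmarGimenez/PYTHON_CISCO | encuentra_palabras.py | encontrar_palabra
-- ===== SOURCE A (Python) =====
-- def encontrar_palabra(palabra, caracteres):
--     palabra = palabra.lower()
--     caracteres = caracteres.lower()
--     caracteres_disponibles = list(caracteres)
--
--     for letra in palabra:
--         if letra in caracteres_disponibles:
--             caracteres_disponibles.remove(letra)
--         else:
--             return "no"
--     return "si"
-- ===== SOURCE B (Python) =====
-- def encontrar_palabra(palabra, caracteres):
--     sp = sorted(palabra.lower())
--     sc = sorted(caracteres.lower())
--     j = 0
--     n = len(sc)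
--     for letra in sp:
--         while j < n and sc[j] < letra:
--             j += 1
--         if j == n or sc[j] != letra:
--             return "no"
--         j += 1
--     return "si"
-- ===== Notes on version B (the rewrite author's own statement) =====
-- stated objective: faster
-- what changed: Replaces the per-letter linear scan-and-remove over the available list with sorting both lowercased strings once and a single two-pointer merge that consumes matches.
import Mathlib
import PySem

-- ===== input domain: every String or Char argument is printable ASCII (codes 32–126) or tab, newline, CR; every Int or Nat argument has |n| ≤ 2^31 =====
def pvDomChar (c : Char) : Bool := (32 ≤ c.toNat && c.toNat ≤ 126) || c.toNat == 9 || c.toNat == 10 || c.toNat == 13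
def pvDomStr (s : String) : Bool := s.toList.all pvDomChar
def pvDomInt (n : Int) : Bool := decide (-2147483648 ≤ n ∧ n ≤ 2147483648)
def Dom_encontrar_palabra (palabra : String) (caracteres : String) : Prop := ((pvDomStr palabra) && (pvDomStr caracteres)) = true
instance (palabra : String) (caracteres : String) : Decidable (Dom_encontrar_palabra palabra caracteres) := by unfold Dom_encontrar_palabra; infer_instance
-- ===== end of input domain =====

-- B sorts both lowercased strings once and runs a two-pointer merge instead of A's
-- per-letter scan-and-remove over the available-characters list (objective: faster,
-- measured).


-- ===== PORT A =====
-- the for-loop: if letra in available, available.remove(letra) (= erase first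
-- occurrence, exact because membership was just checked), else return "no"
def encLoopA : List Char → List Char → String
  | [], _ => "si"
  | letra :: rest, avail =>
      if letra ∈ avail then encLoopA rest (avail.erase letra) else "no"

def encontrar_palabra (palabra : String) (caracteres : String) : String :=
  encLoopA (PySem.Str.lower palabra).toList (PySem.Str.lower caracteres).toList

-- ===== PORT B =====
-- two-pointer merge over the two sorted lists: advance in sc past chars < letra,
-- then require a match and consume it
def encLoopB : List Char → List Char → String
  | [], _ => "si"
  | _ :: _, [] => "no"
  | a :: p, b :: c =>
      if b < a then encLoopB (a :: p) c
      else if a = b then encLoopB p c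
      else "no"
  termination_by sp sc => sp.length + sc.length
  decreasing_by all_goals simp; try omega

def encontrar_palabra_alt (palabra : String) (caracteres : String) : String :=
  encLoopB (PySem.List.sorted (PySem.Str.lower palabra).toList (fun x => x) false)
           (PySem.List.sorted (PySem.Str.lower caracteres).toList (fun x => x) false)

-- ===== PRECONDITION & SPEC =====
def Spec_encontrar_palabra (palabra : String) (caracteres : String) (out : String) : Prop := out = encontrar_palabra_alt palabra caracteres
instance (palabra : String) (caracteres : String) (out : String) : Decidable (Spec_encontrar_palabra palabra caracteres out) := by unfold Spec_encontrar_palabra; infer_instance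

-- ===== CLAIM (what is proved, stated in full; the proofs are below) =====
def Claim_equal_encontrar_palabra : Prop := ∀ (palabra : String) (caracteres : String), Dom_encontrar_palabra palabra caracteres → Spec_encontrar_palabra palabra caracteres (encontrar_palabra palabra caracteres)

-- ===== LEMMAS AND PROOFS =====

-- both loops return "si" or "no"
theorem encLoopA_si_or_no (p avail : List Char) :
    encLoopA p avail = "si" ∨ encLoopA p avail = "no" := by
  induction p generalizing avail with
  | nil => left; rfl
  | cons a rest ih =>
      simp only [encLoopA]
      split
      · exact ih _
      · right; rfl

theorem encLoopB_si_or_no (sp sc : List Char) :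
    encLoopB sp sc = "si" ∨ encLoopB sp sc = "no" := by
  fun_induction encLoopB
  all_goals first | (left; rfl) | (right; rfl) | assumption

-- count bookkeeping for A's step: consuming one occurrence of an available letter
theorem count_step_erase (a : Char) (rest avail : List Char) (h : a ∈ avail) :
    (∀ ch, rest.count ch ≤ (avail.erase a).count ch) ↔
      (∀ ch, (a :: rest).count ch ≤ avail.count ch) := by
  have hc : 1 ≤ avail.count a := List.one_le_count_iff.mpr h
  constructor
  · intro H ch
    have h1 := H ch
    by_cases hca : ch = a
    · subst hca
      rw [List.count_erase_self] at h1
      rw [List.count_cons_self]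
      omega
    · rw [List.count_erase_of_ne hca] at h1
      rw [List.count_cons_of_ne (Ne.symm hca)]
      exact h1
  · intro H ch
    have h1 := H ch
    by_cases hca : ch = a
    · subst hca
      rw [List.count_cons_self] at h1
      rw [List.count_erase_self]
      omega
    · rw [List.count_cons_of_ne (Ne.symm hca)] at h1
      rw [List.count_erase_of_ne hca]
      exact h1

-- A's loop succeeds iff every character is available with multiplicity
theorem encLoopA_si_iff (p avail : List Char) :
    encLoopA p avail = "si" ↔ ∀ ch, p.count ch ≤ avail.count ch := by
  induction p generalizing avail with
  | nil => simp [encLoopA]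
  | cons a rest ih =>
      simp only [encLoopA]
      by_cases h : a ∈ avail
      · rw [if_pos h, ih, count_step_erase a rest avail h]
      · rw [if_neg h]
        constructor
        · intro H; exact absurd H (by decide)
        · intro H
          have h1 := H a
          rw [List.count_cons_self] at h1
          have : a ∈ avail := List.one_le_count_iff.mp (by omega)
          exact absurd this h

-- count bookkeeping for B's merge: skipping a char absent from sp
theorem count_skip (b : Char) (sp c : List Char) (hz : sp.count b = 0) :
    (∀ ch, sp.count ch ≤ c.count ch) ↔ (∀ ch, sp.count ch ≤ (b :: c).count ch) := by
  constructor
  · intro H ch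
    by_cases hchb : ch = b
    · subst hchb; simp [hz]
    · rw [List.count_cons_of_ne (Ne.symm hchb)]; exact H ch
  · intro H ch
    have h1 := H ch
    by_cases hchb : ch = b
    · subst hchb; simp [hz]
    · rw [List.count_cons_of_ne (Ne.symm hchb)] at h1; exact h1

-- count bookkeeping for B's merge: consuming a matched char on both sides
theorem count_consume (a : Char) (p c : List Char) :
    (∀ ch, p.count ch ≤ c.count ch) ↔ (∀ ch, (a :: p).count ch ≤ (a :: c).count ch) := by
  constructor
  · intro H ch
    have h1 := H ch
    by_cases hca : ch = a
    · subst hca; rw [List.count_cons_self, List.count_cons_self]; omega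
    · rw [List.count_cons_of_ne (Ne.symm hca), List.count_cons_of_ne (Ne.symm hca)]; exact h1
  · intro H ch
    have h1 := H ch
    by_cases hca : ch = a
    · subst hca; rw [List.count_cons_self, List.count_cons_self] at h1; omega
    · rw [List.count_cons_of_ne (Ne.symm hca), List.count_cons_of_ne (Ne.symm hca)] at h1; exact h1

-- B's merge succeeds iff every character is available with multiplicity (on sorted inputs)
theorem encLoopB_si_iff (sp sc : List Char)
    (hp : sp.Pairwise (· ≤ ·)) (hc : sc.Pairwise (· ≤ ·)) :
    encLoopB sp sc = "si" ↔ ∀ ch, sp.count ch ≤ sc.count ch := by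
  induction sc generalizing sp with
  | nil =>
      cases sp with
      | nil => simp [encLoopB]
      | cons a p =>
          simp only [encLoopB]
          constructor
          · intro H; exact absurd H (by decide)
          · intro H
            have h1 := H a
            simp at h1
  | cons b c ihc =>
      cases sp with
      | nil => simp [encLoopB]
      | cons a p =>
          have hpa : ∀ x ∈ p, a ≤ x := fun x hx => List.rel_of_pairwise_cons hp hx
          have hcb : ∀ x ∈ c, b ≤ x := fun x hx => List.rel_of_pairwise_cons hc hx
          have hp' : p.Pairwise (· ≤ ·) := hp.of_cons
          have hc' : c.Pairwise (· ≤ ·) := hc.of_cons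
          simp only [encLoopB]
          by_cases hba : b < a
          · rw [if_pos hba, ihc (a :: p) hp hc']
            have hz : (a :: p).count b = 0 := by
              rw [List.count_eq_zero]
              intro hmem
              rcases List.mem_cons.mp hmem with h1 | h2
              · exact absurd h1 (ne_of_lt hba)
              · exact absurd (hpa b h2) (not_le.mpr hba)
            exact count_skip b (a :: p) c hz
          · rw [if_neg hba]
            by_cases hab : a = b
            · subst hab
              rw [if_pos rfl, ihc p hp' hc']
              exact count_consume a p c
            · rw [if_neg hab]
              have halb : a < b := lt_of_le_of_ne (not_lt.mp hba) hab
              constructor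
              · intro H; exact absurd H (by decide)
              · intro H
                have h1 := H a
                have hz : (b :: c).count a = 0 := by
                  rw [List.count_eq_zero]
                  intro hmem
                  rcases List.mem_cons.mp hmem with h1 | h2
                  · exact absurd h1 (ne_of_lt halb)
                  · exact absurd (hcb a h2) (not_le.mpr halb)
                rw [List.count_cons_self, hz] at h1
                omega

theorem encontrar_palabra_eq_alt (palabra caracteres : String) :
    encontrar_palabra palabra caracteres = encontrar_palabra_alt palabra caracteres := by
  unfold encontrar_palabra encontrar_palabra_alt
  set lp := (PySem.Str.lower palabra).toList with hlp
  set lc := (PySem.Str.lower caracteres).toList with hlc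
  have hperm_p := PySem.List.sorted_perm lp (fun x : Char => x) false
  have hperm_c := PySem.List.sorted_perm lc (fun x : Char => x) false
  have hA := encLoopA_si_iff lp lc
  have hB := encLoopB_si_iff (PySem.List.sorted lp (fun x => x) false)
      (PySem.List.sorted lc (fun x => x) false)
      (PySem.List.sorted_pairwise lp (fun x => x))
      (PySem.List.sorted_pairwise lc (fun x => x))
  have hcount : (∀ ch, (PySem.List.sorted lp (fun x => x) false).count ch ≤
      (PySem.List.sorted lc (fun x => x) false).count ch) ↔
      (∀ ch, lp.count ch ≤ lc.count ch) := by
    constructor <;> intro H ch <;>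
      simpa [hperm_p.count_eq, hperm_c.count_eq] using H ch
  by_cases h : ∀ ch, lp.count ch ≤ lc.count ch
  · rw [hA.mpr h, hB.mpr (hcount.mpr h)]
  · have hA' : encLoopA lp lc = "no" := by
      rcases encLoopA_si_or_no lp lc with hs | hn
      · exact absurd (hA.mp hs) h
      · exact hn
    have hB' : encLoopB (PySem.List.sorted lp (fun x => x) false)
        (PySem.List.sorted lc (fun x => x) false) = "no" := by
      rcases encLoopB_si_or_no (PySem.List.sorted lp (fun x => x) false)
          (PySem.List.sorted lc (fun x => x) false) with hs | hn
      · exact absurd (hcount.mp (hB.mp hs)) h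
      · exact hn
    rw [hA', hB']

-- ===== VERDICT (by name: the statement is the Claim_ definition above) =====
theorem encontrar_palabra_spec : Claim_equal_encontrar_palabra := by
  intro palabra caracteres _
  exact encontrar_palabra_eq_alt palabra caracteres
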